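-- pv_equiv track=rewrite | github.com/ytlee3/quantum_krylov_subspace_algorithm | measure_model.py | hubbard_edges
-- ===== SOURCE A (Python) =====
-- def hubbard_edges(n):
--     '''
--     Getting the edge of the 1D Hubbard model with spin ladder configuration
--     0-3-4-7 spin up
--     | | | |
--     1-2-5-6 spin down
--     up_edges (0,3)(3,4)(4,7)
--     down_edges (1,2)(2,5)(5,6)
--     site_edges (0,1)(2,3)(4,5)(6,7)
--     Args:
--         n (int): size of system
--     Return:
--         up_edges(list), down_edges(list), site_edges (list)
--     '''
--     up_edges, down_edges, site_edges = [],[],[]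
--     for i in range(n//2):
--         if i+1 < n:
--             site_edges.append((i*2,i*2+1))
--     up, down  = [], []
--     for i in range(n//4):
--         up.append(4*i), up.append(4*i+3)
--         down.append(4*i+1), down.append(4*i+2)
--
--     up_edges= [(up[i], up[i+1]) for i in range(len(up)-1)]
--     down_edges=[(down[i], down[i+1]) for i in range(len(down)-1)]
--     return up_edges, down_edges, site_edges
-- ===== SOURCE B (Python) =====
-- def hubbard_edges(n):
--     site_edges = [(2 * i, 2 * i + 1) for i in range(n // 2)]
--     m = n // 4
--     up_edges, down_edges = [], []
--     for i in range(m):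
--         if i + 1 < m:
--             up_edges += [(4 * i, 4 * i + 3), (4 * i + 3, 4 * i + 4)]
--             down_edges += [(4 * i + 1, 4 * i + 2), (4 * i + 2, 4 * i + 5)]
--         else:
--             up_edges.append((4 * i, 4 * i + 3))
--             down_edges.append((4 * i + 1, 4 * i + 2))
--     return up_edges, down_edges, site_edges
-- ===== Notes on version B (the rewrite author's own statement) =====
-- stated objective: simpler
-- what changed: B drops the always-true site guard and emits up/down edges directly per block (interior edge plus bridging edge when not last), instead of materializing flat up/down node lists and windowing them with indexed comprehensions.
import Mathlib
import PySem

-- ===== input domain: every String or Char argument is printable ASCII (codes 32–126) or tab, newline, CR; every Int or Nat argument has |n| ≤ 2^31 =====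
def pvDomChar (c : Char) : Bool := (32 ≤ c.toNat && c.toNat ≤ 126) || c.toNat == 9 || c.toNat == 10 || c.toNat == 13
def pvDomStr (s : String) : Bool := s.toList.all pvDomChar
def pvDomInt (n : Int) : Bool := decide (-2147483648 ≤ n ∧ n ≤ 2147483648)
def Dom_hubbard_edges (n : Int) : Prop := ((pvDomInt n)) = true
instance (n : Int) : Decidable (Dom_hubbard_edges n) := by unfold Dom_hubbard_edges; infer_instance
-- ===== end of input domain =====

-- B replaces A's build-then-window construction of up/down edges by direct per-block edge emission
-- and drops the always-true site guard; objective: simpler, same O(n) cost.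

-- ===== PORT A =====
def hubbard_edges (n : Int) : (List (Int × Int)) × (List (Int × Int)) × (List (Int × Int)) :=
  let site_edges := (PySem.List.pyRange 0 (PySem.Int.floordiv n 2) 1).foldl
    (fun acc i => if i + 1 < n then acc ++ [(i * 2, i * 2 + 1)] else acc) []
  let ud := (PySem.List.pyRange 0 (PySem.Int.floordiv n 4) 1).foldl
    (fun (s : List Int × List Int) i =>
      (s.1 ++ [4 * i] ++ [4 * i + 3], s.2 ++ [4 * i + 1] ++ [4 * i + 2])) ([], [])
  let up := ud.1
  let down := ud.2
  -- up[i]/down[i]: range(len(up)-1) only yields in-range indices, so pyGetD with default 0 is exact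
  let up_edges := (PySem.List.pyRange 0 (PySem.List.len up - 1) 1).map
    (fun i => (PySem.List.pyGetD up i 0, PySem.List.pyGetD up (i + 1) 0))
  let down_edges := (PySem.List.pyRange 0 (PySem.List.len down - 1) 1).map
    (fun i => (PySem.List.pyGetD down i 0, PySem.List.pyGetD down (i + 1) 0))
  (up_edges, down_edges, site_edges)

-- ===== PORT B =====
def hubbard_edges_alt (n : Int) : (List (Int × Int)) × (List (Int × Int)) × (List (Int × Int)) :=
  let site_edges := (PySem.List.pyRange 0 (PySem.Int.floordiv n 2) 1).map
    (fun i => (2 * i, 2 * i + 1))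
  let m := PySem.Int.floordiv n 4
  let ud := (PySem.List.pyRange 0 m 1).foldl
    (fun (s : List (Int × Int) × List (Int × Int)) i =>
      if i + 1 < m then
        (s.1 ++ [(4 * i, 4 * i + 3), (4 * i + 3, 4 * i + 4)],
         s.2 ++ [(4 * i + 1, 4 * i + 2), (4 * i + 2, 4 * i + 5)])
      else
        (s.1 ++ [(4 * i, 4 * i + 3)], s.2 ++ [(4 * i + 1, 4 * i + 2)]))
    ([], [])
  (ud.1, ud.2, site_edges)

-- ===== PRECONDITION & SPEC =====
def Spec_hubbard_edges (n : Int) (out : (List (Int × Int)) × (List (Int × Int)) × (List (Int × Int))) : Prop := out = hubbard_edges_alt n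
instance (n : Int) (out : (List (Int × Int)) × (List (Int × Int)) × (List (Int × Int))) : Decidable (Spec_hubbard_edges n out) := by unfold Spec_hubbard_edges; infer_instance

-- ===== CLAIM (what is proved, stated in full; the proofs are below) =====
def Claim_equal_hubbard_edges : Prop := ∀ (n : Int), Dom_hubbard_edges n → Spec_hubbard_edges n (hubbard_edges n)

-- ===== LEMMAS AND PROOFS =====

-- proof-side helpers: the flat up/down node list of A as a flatMap, and the chained edge list
def pvBlocks (a b : Int) (k : Nat) : List Int :=
  (List.range k).flatMap (fun j => [4 * (j : Int) + a, 4 * (j : Int) + b])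

def pvChain (p q : Int → Int × Int) (k : Nat) : List (Int × Int) :=
  (List.range k).flatMap (fun j => [p (j : Int), q (j : Int)])

lemma pvBlocks_succ (a b : Int) (k : Nat) :
    pvBlocks a b (k + 1) = pvBlocks a b k ++ [4 * (k : Int) + a, 4 * (k : Int) + b] := by
  simp [pvBlocks, List.range_succ]

lemma pvBlocks_len (a b : Int) (k : Nat) : (pvBlocks a b k).length = 2 * k := by
  induction k with
  | zero => simp [pvBlocks]
  | succ k ih => rw [pvBlocks_succ]; simp [ih]; omega

lemma pvChain_succ (p q : Int → Int × Int) (k : Nat) :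
    pvChain p q (k + 1) = pvChain p q k ++ [p (k : Int), q (k : Int)] := by
  simp [pvChain, List.range_succ]

lemma pvGetD_toNat (xs : List Int) (i : Int) (h : 0 ≤ i) :
    PySem.List.pyGetD xs i 0 = xs.getD i.toNat 0 := by
  have : i = ((i.toNat : Nat) : Int) := by omega
  rw [this, PySem.List.pyGetD_natCast]; simp [max_eq_left h]

-- A's windowed comprehension over the flat node list, in closed form
lemma pvFA (a b : Int) (k : Nat) :
    (PySem.List.pyRange 0 (2 * (k : Int) + 1) 1).map
      (fun i => (PySem.List.pyGetD (pvBlocks a b (k + 1)) i 0,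
                 PySem.List.pyGetD (pvBlocks a b (k + 1)) (i + 1) 0))
    = pvChain (fun i => (4 * i + a, 4 * i + b)) (fun i => (4 * i + b, 4 * i + 4 + a)) k
      ++ [(4 * (k : Int) + a, 4 * (k : Int) + b)] := by
  induction k with
  | zero =>
    rw [show (2 * ((0:Nat) : Int) + 1) = 0 + 1 by norm_num, PySem.List.pyRange_one_singleton]
    simp [pvBlocks, pvChain, PySem.List.pyGetD_zero, pvGetD_toNat]
  | succ k ih =>
    have h1 : (0:Int) ≤ 2 * (k:Int) + 1 := by omega
    have h2 : (0:Int) ≤ 2 * (k:Int) + 2 := by omega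
    have hsplit : PySem.List.pyRange 0 (2 * ((k+1 : Nat) : Int) + 1) 1
        = PySem.List.pyRange 0 (2 * (k:Int) + 1) 1 ++ [2 * (k:Int) + 1, 2 * (k:Int) + 2] := by
      push_cast
      rw [show (2 * ((k:Int) + 1) + 1) = (2 * (k:Int) + 2) + 1 by ring,
          PySem.List.pyRange_one_succ_right h2,
          show (2 * (k:Int) + 2) = (2 * (k:Int) + 1) + 1 by ring,
          PySem.List.pyRange_one_succ_right h1]
      simp
    rw [hsplit, List.map_append]
    have hlen : (pvBlocks a b (k + 1)).length = 2 * k + 2 := by rw [pvBlocks_len]; ring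
    have hblk : pvBlocks a b (k + 1 + 1)
        = pvBlocks a b (k + 1) ++ [4 * ((k:Int) + 1) + a, 4 * ((k:Int) + 1) + b] := by
      rw [pvBlocks_succ]; push_cast; ring_nf
    -- first segment: indices stay inside the old block list
    have hfirst : (PySem.List.pyRange 0 (2 * (k:Int) + 1) 1).map
        (fun i => (PySem.List.pyGetD (pvBlocks a b (k + 1 + 1)) i 0,
                   PySem.List.pyGetD (pvBlocks a b (k + 1 + 1)) (i + 1) 0))
        = (PySem.List.pyRange 0 (2 * (k:Int) + 1) 1).map
        (fun i => (PySem.List.pyGetD (pvBlocks a b (k + 1)) i 0,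
                   PySem.List.pyGetD (pvBlocks a b (k + 1)) (i + 1) 0)) := by
      apply List.map_congr_left
      intro x hx
      have hb := (PySem.List.mem_pyRange_one).mp hx
      have e1 : PySem.List.pyGetD (pvBlocks a b (k + 1 + 1)) x 0
          = PySem.List.pyGetD (pvBlocks a b (k + 1)) x 0 := by
        rw [hblk, pvGetD_toNat _ _ (by omega), pvGetD_toNat _ _ (by omega),
            List.getD_append _ _ _ _ (by omega)]
      have e2 : PySem.List.pyGetD (pvBlocks a b (k + 1 + 1)) (x + 1) 0
          = PySem.List.pyGetD (pvBlocks a b (k + 1)) (x + 1) 0 := by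
        rw [hblk, pvGetD_toNat _ _ (by omega), pvGetD_toNat _ _ (by omega),
            List.getD_append _ _ _ _ (by omega)]
      rw [e1, e2]
    rw [hfirst, ih]
    -- the two appended indices hit the bridge edge and the new interior edge
    have glast : ∀ (j : Nat), j < 2 * k + 4 →
        PySem.List.pyGetD (pvBlocks a b (k + 1 + 1)) ((j:Int)) 0
          = (pvBlocks a b (k + 1 + 1)).getD j 0 := by
      intro j hj; rw [pvGetD_toNat _ _ (by omega)]; simp
    have hlen2 : (pvBlocks a b (k + 1 + 1)).length = 2 * k + 4 := by rw [pvBlocks_len]; ring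
    have hlk : (pvBlocks a b k).length = 2 * k := pvBlocks_len a b k
    have v1 : (pvBlocks a b (k + 1 + 1)).getD (2 * k + 1) 0 = 4 * (k:Int) + b := by
      rw [hblk, List.getD_append _ _ _ _ (by omega), pvBlocks_succ,
          List.getD_append_right _ _ _ _ (by omega), hlk]
      simp [show 2 * k + 1 - 2 * k = 1 from by omega]
    have v2 : (pvBlocks a b (k + 1 + 1)).getD (2 * k + 2) 0 = 4 * ((k:Int) + 1) + a := by
      rw [hblk, List.getD_append_right _ _ _ _ (by omega), hlen]
      simp
    have v3 : (pvBlocks a b (k + 1 + 1)).getD (2 * k + 3) 0 = 4 * ((k:Int) + 1) + b := by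
      rw [hblk, List.getD_append_right _ _ _ _ (by omega), hlen]
      simp [show 2 * k + 3 - (2 * k + 2) = 1 by omega]
    have c1 : ((2 * (k:Int) + 1)) = (((2 * k + 1 : Nat) : Int)) := by push_cast; ring
    have c2 : ((2 * (k:Int) + 1) + 1) = (((2 * k + 2 : Nat) : Int)) := by push_cast; ring
    have c3 : ((2 * (k:Int) + 2)) = (((2 * k + 2 : Nat) : Int)) := by push_cast; ring
    have c4 : ((2 * (k:Int) + 2) + 1) = (((2 * k + 3 : Nat) : Int)) := by push_cast; ring
    simp only [List.map_cons, List.map_nil]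
    rw [c4, c2, c3, c1, glast _ (by omega), glast _ (by omega), glast _ (by omega),
        v1, v2, v3, pvChain_succ]
    push_cast
    simp [List.append_assoc]
    constructor <;> ring
lemma pvFlat (p q : Int → Int × Int) (k : Nat) :
    List.flatMap (fun (a : Nat) => [p (a : Int), q (a : Int)]) (List.range k) =
    List.flatMap (fun i => [p i, q i]) (List.flatMap (fun a => [((a : Nat) : Int)]) (List.range k)) := by
  induction k with
  | zero => simp
  | succ k ih => simp [List.range_succ, ih]

-- B's per-block fold, in closed form
lemma pvGB (p q : Int → Int × Int) (k : Nat) :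
    (PySem.List.pyRange 0 ((k : Int) + 1) 1).foldl
      (fun acc i => if i + 1 < ((k : Int) + 1) then acc ++ [p i, q i] else acc ++ [p i]) []
    = pvChain p q k ++ [p (k : Int)] := by
  have h0 : (0:Int) ≤ (k:Int) := Int.natCast_nonneg k
  rw [PySem.List.pyRange_one_succ_right h0, List.foldl_append]
  have hcong : List.foldl
      (fun acc i => if i + 1 < (k:Int) + 1 then acc ++ [p i, q i] else acc ++ [p i])
      ([] : List (Int × Int)) (PySem.List.pyRange 0 (k:Int) 1)
      = List.foldl (fun acc i => acc ++ [p i, q i]) [] (PySem.List.pyRange 0 (k:Int) 1) := by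
    apply PySem.List.foldl_congr_mem
    intro acc x hx
    have hb := (PySem.List.mem_pyRange_one).mp hx
    simp [show x + 1 < (k:Int) + 1 from by omega]
  rw [hcong, PySem.List.foldl_append_eq_flatMap]
  simp only [List.foldl_cons, List.foldl_nil, lt_irrefl]
  rw [PySem.List.pyRange_one]
  simp [pvChain]
  rw [List.flatMap_map]
  exact pvFlat p q k

lemma pvChain_congr (p q p' q' : Int → Int × Int) (k : Nat)
    (h1 : ∀ i, p i = p' i) (h2 : ∀ i, q i = q' i) : pvChain p q k = pvChain p' q' k := by
  unfold pvChain; congr 1; funext j; rw [h1, h2]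

-- A's 'append two nodes per block' loop is a flatMap
lemma pvAflat (u v : Int → Int) (m : Int) :
    (PySem.List.pyRange 0 m 1).foldl (fun acc i => acc ++ [u i] ++ [v i]) [] =
    (PySem.List.pyRange 0 m 1).flatMap (fun i => [u i, v i]) := by
  have hcong : (PySem.List.pyRange 0 m 1).foldl (fun acc i => acc ++ [u i] ++ [v i]) []
      = (PySem.List.pyRange 0 m 1).foldl (fun acc i => acc ++ [u i, v i]) [] := by
    apply PySem.List.foldl_congr_mem
    intro acc x _
    simp
  rw [hcong, PySem.List.foldl_append_eq_flatMap]
  simp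

lemma pvblocks_eq (a b : Int) (k : Nat) :
    (PySem.List.pyRange 0 ((k : Int)) 1).flatMap (fun i => [4 * i + a, 4 * i + b])
    = pvBlocks a b k := by
  induction k with
  | zero => simp [pvBlocks, PySem.List.pyRange_one_eq_nil]
  | succ k ih =>
    rw [show ((k + 1 : Nat) : Int) = (k : Int) + 1 from by push_cast; ring,
        PySem.List.pyRange_one_succ_right (Int.natCast_nonneg k), List.flatMap_append,
        ih, pvBlocks_succ]
    simp

-- the site-edge lists agree
lemma pv_site (n : Int) :
    (PySem.List.pyRange 0 (PySem.Int.floordiv n 2) 1).foldl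
      (fun acc i => if i + 1 < n then acc ++ [(i * 2, i * 2 + 1)] else acc) []
    = (PySem.List.pyRange 0 (PySem.Int.floordiv n 2) 1).map (fun i => (2 * i, 2 * i + 1)) := by
  have hd : PySem.Int.floordiv n 2 = n / 2 := PySem.Int.floordiv_eq_ediv_of_pos (by norm_num)
  have hcong : (PySem.List.pyRange 0 (PySem.Int.floordiv n 2) 1).foldl
      (fun acc i => if i + 1 < n then acc ++ [(i * 2, i * 2 + 1)] else acc) []
      = (PySem.List.pyRange 0 (PySem.Int.floordiv n 2) 1).foldl
      (fun acc i => acc ++ [(i * 2, i * 2 + 1)]) [] := by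
    apply PySem.List.foldl_congr_mem
    intro acc x hx
    have hb := (PySem.List.mem_pyRange_one).mp hx
    rw [hd] at hb
    simp [show x + 1 < n from by omega]
  rw [hcong, PySem.List.foldl_append_singleton_eq_map]
  simp
  intros
  ring

-- ===== VERDICT (by name: the statement is the Claim_ definition above) =====
theorem hubbard_edges_spec : Claim_equal_hubbard_edges := by
  intro n _
  show hubbard_edges n = hubbard_edges_alt n
  simp only [hubbard_edges, hubbard_edges_alt]
  rw [PySem.List.foldl_prod_mk
        (f := fun (acc : List Int) i => acc ++ [4 * i] ++ [4 * i + 3])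
        (g := fun (acc : List Int) i => acc ++ [4 * i + 1] ++ [4 * i + 2])]
  simp only [Prod.mk.injEq]
  set m := PySem.Int.floordiv n 4 with hm
  by_cases hm0 : m ≤ 0
  · -- no blocks: all up/down structures are empty
    rw [PySem.List.pyRange_one_eq_nil hm0]
    refine ⟨?_, ?_, pv_site n⟩ <;>
      simp
  · -- at least one block
    replace hm0 : 0 < m := by omega
    obtain ⟨k, hk⟩ : ∃ k : Nat, m = (k : Int) + 1 := ⟨(m - 1).toNat, by omega⟩
    rw [hk]
    have hup : (PySem.List.pyRange 0 ((k : Int) + 1) 1).foldl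
        (fun acc i => acc ++ [4 * i] ++ [4 * i + 3]) [] = pvBlocks 0 3 (k + 1) := by
      rw [pvAflat, show (fun (i : Int) => [4 * i, 4 * i + 3])
            = (fun (i : Int) => [4 * i + 0, 4 * i + 3]) from by funext i; simp,
          show ((k : Int) + 1) = (((k + 1 : Nat) : Int)) from by push_cast; ring, pvblocks_eq]
    have hdn : (PySem.List.pyRange 0 ((k : Int) + 1) 1).foldl
        (fun acc i => acc ++ [4 * i + 1] ++ [4 * i + 2]) [] = pvBlocks 1 2 (k + 1) := by
      rw [pvAflat,
          show ((k : Int) + 1) = (((k + 1 : Nat) : Int)) from by push_cast; ring, pvblocks_eq]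
    have hlenU : PySem.List.len (pvBlocks 0 3 (k + 1)) - 1 = 2 * (k : Int) + 1 := by
      simp [pvBlocks_len]; ring
    have hlenD : PySem.List.len (pvBlocks 1 2 (k + 1)) - 1 = 2 * (k : Int) + 1 := by
      simp [pvBlocks_len]; ring
    -- split B's pair fold into its two component folds
    have hB : List.foldl (fun (s : List (Int × Int) × List (Int × Int)) i =>
          if i + 1 < (k : Int) + 1 then
            (s.1 ++ [(4 * i, 4 * i + 3), (4 * i + 3, 4 * i + 4)],
             s.2 ++ [(4 * i + 1, 4 * i + 2), (4 * i + 2, 4 * i + 5)])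
          else (s.1 ++ [(4 * i, 4 * i + 3)], s.2 ++ [(4 * i + 1, 4 * i + 2)]))
        ([], []) (PySem.List.pyRange 0 ((k : Int) + 1) 1)
      = (List.foldl (fun acc i => if i + 1 < (k : Int) + 1 then
            acc ++ [(4 * i, 4 * i + 3), (4 * i + 3, 4 * i + 4)] else acc ++ [(4 * i, 4 * i + 3)])
            [] (PySem.List.pyRange 0 ((k : Int) + 1) 1),
         List.foldl (fun acc i => if i + 1 < (k : Int) + 1 then
            acc ++ [(4 * i + 1, 4 * i + 2), (4 * i + 2, 4 * i + 5)] else acc ++ [(4 * i + 1, 4 * i + 2)])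
            [] (PySem.List.pyRange 0 ((k : Int) + 1) 1)) := by
      rw [← PySem.List.foldl_prod_mk
          (f := fun acc i => if i + 1 < (k : Int) + 1 then
            acc ++ [(4 * i, 4 * i + 3), (4 * i + 3, 4 * i + 4)] else acc ++ [(4 * i, 4 * i + 3)])
          (g := fun acc i => if i + 1 < (k : Int) + 1 then
            acc ++ [(4 * i + 1, 4 * i + 2), (4 * i + 2, 4 * i + 5)] else acc ++ [(4 * i + 1, 4 * i + 2)])]
      apply PySem.List.foldl_congr_mem
      intro acc x _
      split_ifs <;> rfl
    rw [hB]
    refine ⟨?_, ?_, pv_site n⟩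
    · rw [hup, hlenU, pvFA,
          pvChain_congr (p' := fun i => (4 * i, 4 * i + 3)) (q' := fun i => (4 * i + 3, 4 * i + 4))
            _ _ _ (by intro i; simp) (by intro i; simp)]
      rw [pvGB (p := fun i => (4 * i, 4 * i + 3)) (q := fun i => (4 * i + 3, 4 * i + 4)) k]
      simp
    · rw [hdn, hlenD, pvFA,
          pvChain_congr (p' := fun i => (4 * i + 1, 4 * i + 2)) (q' := fun i => (4 * i + 2, 4 * i + 5))
            _ _ _ (by intro i; simp) (by intro i; simp; ring)]
      rw [pvGB (p := fun i => (4 * i + 1, 4 * i + 2)) (q := fun i => (4 * i + 2, 4 * i + 5)) k]
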